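-- pv_equiv track=rewrite | github.com/XY-King/CyberDiva | charaChat.py | seperate_response
-- ===== SOURCE A (Python) =====
-- import string
--
-- def seperate_response(response: string, charaSet: dict):
--     response_list = []
--     # seperate the response into a list of strings by contents in brackets
--     while True:
--         if not "[" in response:
--             if not response in ["", "\n", " ", '"']:
--                 response_list.append({"type": "text", "content": response})
--             break
--         else:
--             left = response.index("[")
--             right = response.index("]")
--             content_in = response[left + 1 : right]
--             content_before = response[:left]
--             content_after = response[right + 1 :]
--             if not content_before in ["", "\n", " ", '"']:
--                 response_list.append({"type": "text", "content": content_before})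
--
--             # remove the character name from the motion
--             content_in = content_in.replace(charaSet["name"], "")
--             response_list.append({"type": "motion", "content": content_in})
--             response = content_after
--
--     return response_list
-- ===== SOURCE B (Python) =====
-- def seperate_response(response: str, charaSet: dict):
--     # One left-to-right scan over the characters, tracking whether we are
--     # inside a bracketed motion; no repeated .index scans or tail re-slicing.
--     skip = ("", "\n", " ", '"')
--     if "[" not in response:
--         return [] if response in skip else [{"type": "text", "content": response}]
--     name = charaSet["name"]
--     out = []
--     buf = []
--     in_motion = False
--     for ch in response:
--         if not in_motion and ch == "[":
--             text = "".join(buf)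
--             if text not in skip:
--                 out.append({"type": "text", "content": text})
--             buf = []
--             in_motion = True
--         elif in_motion and ch == "]":
--             out.append({"type": "motion", "content": "".join(buf).replace(name, "")})
--             buf = []
--             in_motion = False
--         else:
--             buf.append(ch)
--     tail = "".join(buf)
--     if in_motion:
--         out.append({"type": "motion", "content": tail.replace(name, "")})
--     elif tail not in skip:
--         out.append({"type": "text", "content": tail})
--     return out
-- ===== Notes on version B (the rewrite author's own statement) =====
-- stated objective: alternative
-- what changed: A repeatedly rescans and reslices the remaining string with .index and slicing in a while-loop; B makes one left-to-right scan over the characters with an in_motion flag and a buffer, emitting each segment as it closes.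
-- intended difference: On inputs where a ']' occurs before the next '[' (with a '[' still following), A appends a spurious empty motion entry and duplicates the text between that ']' and the '[' into two entries; B returns the intended segmentation (text between motions once, one motion per bracket pair). — e.g. on seperate_response("][]", [("name", "N")]): A returns [[("type", "text"), ("content", "]")], [("type", "motion"), ("content", "")], [("type", "motion"), ("content", "")]], B returns [[("type", "text"), ("content", "]")], [("type", "motion"), ("content", "")]]
import Mathlib
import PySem

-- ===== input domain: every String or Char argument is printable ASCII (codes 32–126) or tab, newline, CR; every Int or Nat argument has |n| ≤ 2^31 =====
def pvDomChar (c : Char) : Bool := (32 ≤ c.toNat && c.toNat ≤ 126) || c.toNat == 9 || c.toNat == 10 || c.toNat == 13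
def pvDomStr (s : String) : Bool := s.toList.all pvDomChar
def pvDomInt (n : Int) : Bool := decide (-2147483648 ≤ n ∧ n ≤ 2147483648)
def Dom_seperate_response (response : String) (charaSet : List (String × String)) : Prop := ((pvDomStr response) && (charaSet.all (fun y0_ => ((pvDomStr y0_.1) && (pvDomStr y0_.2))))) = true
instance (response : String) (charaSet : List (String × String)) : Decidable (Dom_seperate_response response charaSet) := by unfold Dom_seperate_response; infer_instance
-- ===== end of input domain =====

-- B replaces A's repeated `.index`/slice loop by a single left-to-right scan; on the
-- quirky inputs where A sees a ']' before the next '[' (D_ below) B returns the intended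
-- clean segmentation instead of A's duplicated-text/empty-motion artifact.

-- ===== PORT A =====
def pvEntryText (s : String) : List (String × String) := [("type", "text"), ("content", s)]
def pvEntryMotion (s : String) : List (String × String) := [("type", "motion"), ("content", s)]
-- membership test `x in ["", "\n", " ", '"']`
def pvSkip (s : String) : Bool := s ∈ ["", "\n", " ", "\""]

-- the while-loop of A, as recursion on the remaining characters (fuel > cs.length, so the
-- 0-fuel arm is never reached: each iteration drops at least one character); Python's
-- response[a:b] with 0 ≤ a,b is (take b).drop a; the `none`/`else []` arms are where
-- Python raises KeyError / ValueError (excluded by Pre_).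
def sepA (charaSet : List (String × String)) : Nat → List Char → List (List (String × String))
  | 0, _ => []
  | fuel + 1, cs =>
    if '[' ∈ cs then
      if ']' ∈ cs then
        match PySem.Dict.get? (PySem.Dict.mk charaSet) "name" with
        | none => []  -- Python: KeyError
        | some name =>
          let l := cs.idxOf '['
          let r := cs.idxOf ']'
          let contentIn := (cs.take r).drop (l + 1)
          let contentBefore := cs.take l
          let contentAfter := cs.drop (r + 1)
          (if pvSkip (String.ofList contentBefore) then [] else [pvEntryText (String.ofList contentBefore)])
            ++ (pvEntryMotion (PySem.Str.replace (String.ofList contentIn) name "") :: sepA charaSet fuel contentAfter)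
      else []  -- Python: ValueError from response.index("]")
    else if pvSkip (String.ofList cs) then [] else [pvEntryText (String.ofList cs)]

def seperate_response (response : String) (charaSet : List (String × String)) : List (List (String × String)) :=
  sepA charaSet (response.toList.length + 1) response.toList

-- ===== PORT B =====
-- one step of B's scan: state = (out, buf, in_motion)
def sepBStep (name : String) (st : List (List (String × String)) × List Char × Bool) (ch : Char) :
    List (List (String × String)) × List Char × Bool :=
  if st.2.2 = false ∧ ch = '[' then
    ((if pvSkip (String.ofList st.2.1) then st.1 else st.1 ++ [pvEntryText (String.ofList st.2.1)]), [], true)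
  else if st.2.2 = true ∧ ch = ']' then
    (st.1 ++ [pvEntryMotion (PySem.Str.replace (String.ofList st.2.1) name "")], [], false)
  else (st.1, st.2.1 ++ [ch], st.2.2)

-- B's code after the for-loop (flushing the buffer)
def sepBFinish (name : String) (st : List (List (String × String)) × List Char × Bool) :
    List (List (String × String)) :=
  if st.2.2 then st.1 ++ [pvEntryMotion (PySem.Str.replace (String.ofList st.2.1) name "")]
  else if pvSkip (String.ofList st.2.1) then st.1 else st.1 ++ [pvEntryText (String.ofList st.2.1)]

def seperate_response_alt (response : String) (charaSet : List (String × String)) : List (List (String × String)) :=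
  if '[' ∈ response.toList then
    match PySem.Dict.get? (PySem.Dict.mk charaSet) "name" with
    | none => []  -- Python: KeyError
    | some name => sepBFinish name (response.toList.foldl (sepBStep name) ([], [], false))
  else if pvSkip response then [] else [pvEntryText response]

-- ===== PRECONDITION & SPEC =====
-- every '[' is followed by some ']' (else A's response.index("]") raises ValueError)
def pvPreB : List Char → Bool
  | [] => true
  | c :: r => if c = '[' then decide (']' ∈ r) && pvPreB r else pvPreB r

-- scan for a ']' met outside a bracket segment while a '[' still follows
def pvQuirkB : Bool → List Char → Bool
  | _, [] => false
  | st, c :: r =>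
    if st then (if c = ']' then pvQuirkB false r else pvQuirkB true r)
    else if c = ']' then decide ('[' ∈ r)
    else if c = '[' then pvQuirkB true r
    else pvQuirkB false r

-- Pre_ excludes exactly the inputs where A raises: a '[' with no later ']' (ValueError),
-- or a '[' present while charaSet has no "name" key (KeyError).
def Pre_seperate_response (response : String) (charaSet : List (String × String)) : Prop :=
  pvPreB response.toList = true ∧
    ('[' ∈ response.toList → (PySem.Dict.get? (PySem.Dict.mk charaSet) "name").isSome = true)
instance (response : String) (charaSet : List (String × String)) : Decidable (Pre_seperate_response response charaSet) := by
  unfold Pre_seperate_response; infer_instance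

def pvWitness_seperate_response : String × (List (String × String)) :=
  ("hi [waves] there [nods N]", [("name", "N")])

-- On inputs where some ']' occurs before the next '[' (with a '[' still to come), A emits an
-- empty "motion" entry and duplicates the text between that ']' and the '['; B returns the
-- intended segmentation: bracket-free text between motions, each bracket pair one motion.
def D_seperate_response (response : String) (charaSet : List (String × String)) : Prop :=
  pvQuirkB false response.toList = true
instance (response : String) (charaSet : List (String × String)) : Decidable (D_seperate_response response charaSet) := by
  unfold D_seperate_response; infer_instance

def Spec_seperate_response (response : String) (charaSet : List (String × String)) (out : List (List (String × String))) : Prop :=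
  ¬ D_seperate_response response charaSet → out = seperate_response_alt response charaSet
instance (response : String) (charaSet : List (String × String)) (out : List (List (String × String))) : Decidable (Spec_seperate_response response charaSet out) := by
  unfold Spec_seperate_response; infer_instance

def pvDiffWitness_seperate_response : String × (List (String × String)) := ("][]", [("name", "N")])
def pvDiffWitnessOut_seperate_response : (List (List (String × String))) × (List (List (String × String))) :=
  ([[("type", "text"), ("content", "]")], [("type", "motion"), ("content", "")], [("type", "motion"), ("content", "")]],
   [[("type", "text"), ("content", "]")], [("type", "motion"), ("content", "")]])

-- ===== CLAIM (what is proved, stated in full; the proofs are below) =====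
def Claim_unchanged_seperate_response : Prop := ∀ (response : String) (charaSet : List (String × String)), Dom_seperate_response response charaSet → Pre_seperate_response response charaSet → Spec_seperate_response response charaSet (seperate_response response charaSet)
def Claim_exact_seperate_response : Prop := ∀ (response : String) (charaSet : List (String × String)), Dom_seperate_response response charaSet → Pre_seperate_response response charaSet → D_seperate_response response charaSet → seperate_response response charaSet ≠ seperate_response_alt response charaSet
def Claim_changed_seperate_response : Prop := Dom_seperate_response (pvDiffWitness_seperate_response.1) (pvDiffWitness_seperate_response.2) ∧ Pre_seperate_response (pvDiffWitness_seperate_response.1) (pvDiffWitness_seperate_response.2) ∧ D_seperate_response (pvDiffWitness_seperate_response.1) (pvDiffWitness_seperate_response.2) ∧ seperate_response (pvDiffWitness_seperate_response.1) (pvDiffWitness_seperate_response.2) = pvDiffWitnessOut_seperate_response.1 ∧ seperate_response_alt (pvDiffWitness_seperate_response.1) (pvDiffWitness_seperate_response.2) = pvDiffWitnessOut_seperate_response.2 ∧ pvDiffWitnessOut_seperate_response.1 ≠ pvDiffWitnessOut_seperate_response.2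

-- ===== LEMMAS AND PROOFS =====

theorem sepB_out_prefix (name : String) (cs : List Char) : ∀ (out : List (List (String × String))) (buf : List Char) (m : Bool),
    cs.foldl (sepBStep name) (out, buf, m)
      = (out ++ (cs.foldl (sepBStep name) ([], buf, m)).1, (cs.foldl (sepBStep name) ([], buf, m)).2) := by
  induction cs with
  | nil => intro out buf m; simp
  | cons c t ih =>
    intro out buf m
    have key : ∀ (o : List (List (String × String))), sepBStep name (o, buf, m) c
        = (o ++ (sepBStep name ([], buf, m) c).1, (sepBStep name ([], buf, m) c).2) := by
      intro o
      simp only [sepBStep]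
      split_ifs <;> simp
    rw [List.foldl_cons, List.foldl_cons, key out]
    rcases hs : sepBStep name ([], buf, m) c with ⟨o2, b2, m2⟩
    dsimp only
    rw [ih (out ++ o2) b2 m2, ih o2 b2 m2]
    simp

theorem sepB_no_open (name : String) (cs : List Char) (h : '[' ∉ cs) : ∀ (out : List (List (String × String))) (buf : List Char),
    cs.foldl (sepBStep name) (out, buf, false) = (out, buf ++ cs, false) := by
  induction cs with
  | nil => intro out buf; simp
  | cons c t ih =>
    intro out buf
    have hc : c ≠ '[' := fun he => h (by simp [he])
    have hstep : sepBStep name (out, buf, false) c = (out, buf ++ [c], false) := by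
      simp [sepBStep, hc]
    rw [List.foldl_cons, hstep, ih (fun ht => h (List.mem_cons_of_mem _ ht))]
    simp

theorem sepB_no_close (name : String) (cs : List Char) (h : ']' ∉ cs) : ∀ (out : List (List (String × String))) (buf : List Char),
    cs.foldl (sepBStep name) (out, buf, true) = (out, buf ++ cs, true) := by
  induction cs with
  | nil => intro out buf; simp
  | cons c t ih =>
    intro out buf
    have hc : c ≠ ']' := fun he => h (by simp [he])
    have hstep : sepBStep name (out, buf, true) c = (out, buf ++ [c], true) := by
      simp [sepBStep, hc]
    rw [List.foldl_cons, hstep, ih (fun ht => h (List.mem_cons_of_mem _ ht))]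
    simp

theorem sepBFinish_append (name : String) (out o : List (List (String × String))) (buf : List Char) (m : Bool) :
    sepBFinish name (out ++ o, buf, m) = out ++ sepBFinish name (o, buf, m) := by
  simp only [sepBFinish]
  cases m <;> by_cases hs : pvSkip (String.ofList buf) = true <;> simp [hs]

theorem split_first_close (t : List Char) (h : ']' ∈ t) :
    ∃ mid rest, t = mid ++ ']' :: rest ∧ ']' ∉ mid := by
  induction t with
  | nil => cases h
  | cons c r ih =>
    by_cases hc : c = ']'
    · exact ⟨[], r, by simp [hc], by simp⟩
    · have hr : ']' ∈ r := by cases h with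
        | head => exact absurd rfl hc
        | tail _ ht => exact ht
      obtain ⟨mid, rest, he, hm⟩ := ih hr
      exact ⟨c :: mid, rest, by simp [he], by simp [hm]; exact fun x => hc x.symm⟩

theorem pvPreB_append_right (xs : List Char) : ∀ ys, pvPreB (xs ++ ys) = true → pvPreB ys = true := by
  induction xs with
  | nil => intro ys h; exact h
  | cons c t ih =>
    intro ys h
    apply ih
    simp only [List.cons_append, pvPreB] at h
    by_cases hc : c = '[' <;> simp [hc] at h
    · exact h.2
    · exact h

theorem pvQuirk_true_skip (mid : List Char) (h : ']' ∉ mid) : ∀ rest,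
    pvQuirkB true (mid ++ ']' :: rest) = pvQuirkB false rest := by
  induction mid with
  | nil => intro rest; simp [pvQuirkB]
  | cons c t ih =>
    intro rest
    have hc : c ≠ ']' := fun he => h (by simp [he])
    simp only [List.cons_append, pvQuirkB]
    simp only [hc, if_false, if_true]
    exact ih (fun ht => h (List.mem_cons_of_mem _ ht)) rest

theorem sep_decomp2 (cs : List Char) (hb : '[' ∈ cs) (hp : pvPreB cs = true) :
    (∃ before mid rest, cs = before ++ '[' :: (mid ++ ']' :: rest) ∧ '[' ∉ before ∧ ']' ∉ before
        ∧ ']' ∉ mid ∧ pvPreB rest = true ∧ pvQuirkB false cs = pvQuirkB false rest)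
    ∨ (∃ before rest, cs = before ++ ']' :: rest ∧ '[' ∉ before ∧ ']' ∉ before
        ∧ '[' ∈ rest ∧ pvPreB rest = true ∧ pvQuirkB false cs = true) := by
  induction cs with
  | nil => cases hb
  | cons c t ih =>
    by_cases hco : c = '['
    · subst hco
      have hcl : ']' ∈ t ∧ pvPreB t = true := by
        simp only [pvPreB, if_pos] at hp
        simpa using hp
      obtain ⟨mid, rest, he, hm⟩ := split_first_close t hcl.1
      refine Or.inl ⟨[], mid, rest, by simp [he], by simp, by simp, hm, ?_, ?_⟩
      · have := pvPreB_append_right mid (']' :: rest) (he ▸ hcl.2)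
        simpa [pvPreB] using this
      · have h1 : pvQuirkB false ('[' :: t) = pvQuirkB true t := by simp [pvQuirkB]
        rw [h1, he, pvQuirk_true_skip mid hm rest]
    · by_cases hcc : c = ']'
      · subst hcc
        have hbt : '[' ∈ t := by simpa using hb
        refine Or.inr ⟨[], t, by simp, by simp, by simp, hbt, ?_, ?_⟩
        · simpa [pvPreB] using hp
        · simp [pvQuirkB, hbt]
      · have hbt : '[' ∈ t := by cases hb with
          | head => exact absurd rfl hco
          | tail _ ht => exact ht
        have hp' : pvPreB t = true := by simpa [pvPreB, hco] using hp
        have hqeq : pvQuirkB false (c :: t) = pvQuirkB false t := by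
          simp [pvQuirkB, hco, hcc]
        rcases ih hbt hp' with ⟨before, mid, rest, he, h1, h2, h3, h4, h5⟩ |
          ⟨before, rest, he, h1, h2, h3, h4, h5⟩
        · exact Or.inl ⟨c :: before, mid, rest, by simp [he], by (simp [h1]; exact fun x => hco x.symm),
            by (simp [h2]; exact fun x => hcc x.symm), h3, h4, by rw [hqeq, he] at *; exact h5⟩
        · exact Or.inr ⟨c :: before, rest, by simp [he], by (simp [h1]; exact fun x => hco x.symm),
            by (simp [h2]; exact fun x => hcc x.symm), h3, h4, by rw [hqeq, he] at *; exact h5⟩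

theorem idxOf_first (a : Char) (xs ys : List Char) (h : a ∉ xs) : (xs ++ a :: ys).idxOf a = xs.length := by
  induction xs with
  | nil => simp
  | cons c t ih =>
    have hc : c ≠ a := fun he => h (by simp [he])
    rw [List.cons_append]
    simp [hc, ih (fun ht => h (List.mem_cons_of_mem _ ht))]

theorem sep_main (charaSet : List (String × String)) (name : String)
    (hn : PySem.Dict.get? (PySem.Dict.mk charaSet) "name" = some name) :
    ∀ (fuel : Nat) (cs : List Char), cs.length < fuel → pvPreB cs = true → pvQuirkB false cs = false →
      sepA charaSet fuel cs = sepBFinish name (cs.foldl (sepBStep name) ([], [], false)) := by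
  intro fuel
  induction fuel with
  | zero => intro cs h; exact absurd h (Nat.not_lt_zero _)
  | succ n ih =>
    intro cs hlen hp hq
    by_cases hb : '[' ∈ cs
    · obtain ⟨before, mid, rest, he, hnb, hncb, hncm, hpr, hqe⟩ :=
        (sep_decomp2 cs hb hp).resolve_right (fun ⟨_, _, _, _, _, _, _, hq1⟩ => by rw [hq1] at hq; cases hq)
      have hqr : pvQuirkB false rest = false := hqe ▸ hq
      have hcl : ']' ∈ cs := by rw [he]; simp
      -- index computations
      have hl : cs.idxOf '[' = before.length := by rw [he]; exact idxOf_first _ _ _ hnb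
      have hr : cs.idxOf ']' = before.length + 1 + mid.length := by
        have : cs = (before ++ '[' :: mid) ++ ']' :: rest := by simp [he]
        rw [this, idxOf_first ']' (before ++ '[' :: mid) rest (by
          intro hmem
          rcases (List.mem_append.mp hmem) with h' | h'
          · exact hncb h'
          · rcases List.mem_cons.mp h' with h'' | h''
            · exact absurd h'' (by decide)
            · exact hncm h'')]
        simp; omega
      have htb : cs.take before.length = before := by
        rw [he]; exact List.take_left' rfl
      have hti : (cs.take (before.length + 1 + mid.length)).drop (before.length + 1) = mid := by
        have h1 : cs.take (before.length + 1 + mid.length) = (before ++ '[' :: mid) := by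
          have : cs = (before ++ '[' :: mid) ++ ']' :: rest := by simp [he]
          rw [this]; exact List.take_left' (by simp; omega)
        rw [h1]
        have : before ++ '[' :: mid = (before ++ ['[']) ++ mid := by simp
        rw [this]; exact List.drop_left' (by simp)
      have hta : cs.drop (before.length + 1 + mid.length + 1) = rest := by
        have : cs = (before ++ '[' :: mid ++ [']']) ++ rest := by simp [he]
        rw [this]; exact List.drop_left' (by simp; omega)
      have hrest : rest.length < n := by
        have : cs.length = before.length + 1 + (mid.length + 1 + rest.length) := by
          rw [he]; simp; omega
        omega
      -- LHS
      rw [sepA, if_pos hb, if_pos hcl, hn]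
      simp only [hl, hr, htb, hti, hta]
      -- RHS: unfold the fold over the decomposition
      rw [he]
      rw [List.foldl_append]
      rw [sepB_no_open name before hnb]
      have hstep1 : sepBStep name ([], [] ++ before, false) '[' =
          ((if pvSkip (String.ofList before) then [] else [pvEntryText (String.ofList before)]), [], true) := by
        simp [sepBStep]
      rw [List.foldl_cons, hstep1, List.foldl_append, sepB_no_close name mid hncm, List.foldl_cons]
      have hstep2 : sepBStep name
          ((if pvSkip (String.ofList before) then [] else [pvEntryText (String.ofList before)]), [] ++ mid, true) ']' =
          ((if pvSkip (String.ofList before) then [] else [pvEntryText (String.ofList before)])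
            ++ [pvEntryMotion (PySem.Str.replace (String.ofList mid) name "")], [], false) := by
        simp [sepBStep]
      rw [hstep2, sepB_out_prefix, sepBFinish_append]
      rw [ih rest hrest hpr hqr]
      simp
    · rw [sepA, if_neg hb]
      rw [sepB_no_open name cs hb, sepBFinish]
      simp


-- motion-entry count: the statistic that separates A from B inside D_
def pvCM (l : List (List (String × String))) : Nat :=
  (l.filter (fun e => e.head? = some ("type", "motion"))).length

theorem pvCM_nil : pvCM [] = 0 := rfl

theorem pvCM_append (a b : List (List (String × String))) : pvCM (a ++ b) = pvCM a + pvCM b := by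
  simp [pvCM, List.filter_append]

theorem pvCM_text (s : String) : pvCM [pvEntryText s] = 0 := by
  simp [pvCM, pvEntryText]

theorem pvCM_motion_cons (s : String) (l : List (List (String × String))) :
    pvCM (pvEntryMotion s :: l) = pvCM l + 1 := by
  simp [pvCM, pvEntryMotion, List.filter_cons]

theorem pvCM_iftext (b : Bool) (s : String) : pvCM (if b then [] else [pvEntryText s]) = 0 := by
  cases b <;> simp [pvCM_text, pvCM_nil]

-- motion count of B's scan, computed directly from the characters and the in_motion flag
def pvG : Bool → List Char → Nat
  | true, [] => 1
  | false, [] => 0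
  | false, c :: r => if c = '[' then pvG true r else pvG false r
  | true, c :: r => if c = ']' then pvG false r + 1 else pvG true r

theorem pvG_prefix_false (before : List Char) (h : '[' ∉ before) : ∀ x,
    pvG false (before ++ x) = pvG false x := by
  induction before with
  | nil => intro x; rfl
  | cons c t ih =>
    intro x
    have hc : c ≠ '[' := fun he => h (by simp [he])
    simp only [List.cons_append, pvG, hc, if_false]
    exact ih (fun ht => h (List.mem_cons_of_mem _ ht)) x

theorem pvG_prefix_true (mid : List Char) (h : ']' ∉ mid) : ∀ x,
    pvG true (mid ++ x) = pvG true x := by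
  induction mid with
  | nil => intro x; rfl
  | cons c t ih =>
    intro x
    have hc : c ≠ ']' := fun he => h (by simp [he])
    simp only [List.cons_append, pvG, hc, if_false]
    exact ih (fun ht => h (List.mem_cons_of_mem _ ht)) x

theorem pvG_no_open (cs : List Char) (h : '[' ∉ cs) : pvG false cs = 0 := by
  have := pvG_prefix_false cs h []
  simpa using this

theorem pvQuirk_no_open (cs : List Char) (h : '[' ∉ cs) : pvQuirkB false cs = false := by
  induction cs with
  | nil => rfl
  | cons c t ih =>
    have hc : c ≠ '[' := fun he => h (by simp [he])
    have ht : '[' ∉ t := fun ht => h (List.mem_cons_of_mem _ ht)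
    by_cases hcc : c = ']'
    · simp [pvQuirkB, hcc, ht]
    · simp [pvQuirkB, hc, hcc, ih ht]

theorem pvQuirk_open (cs : List Char) : ∀ st, pvQuirkB st cs = true → '[' ∈ cs := by
  induction cs with
  | nil => intro st h; cases h
  | cons c t ih =>
    intro st h
    by_cases hc : c = '['
    · simp [hc]
    · right
      cases st
      · by_cases hcc : c = ']'
        · simp only [pvQuirkB, if_false, hcc, if_true, Bool.false_eq_true] at h
          simpa using h
        · exact ih false (by simpa [pvQuirkB, hc, hcc] using h)
      · by_cases hcc : c = ']'
        · exact ih false (by simpa [pvQuirkB, hcc] using h)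
        · exact ih true (by simpa [pvQuirkB, hcc] using h)

-- B's motion count is pvG of the input
theorem sepB_count (name : String) (cs : List Char) : ∀ (out : List (List (String × String))) (buf : List Char) (m : Bool),
    pvCM (sepBFinish name (cs.foldl (sepBStep name) (out, buf, m))) = pvCM out + pvG m cs := by
  induction cs with
  | nil =>
    intro out buf m
    cases m
    · simp only [List.foldl_nil, sepBFinish, Bool.false_eq_true, if_false, pvG]
      by_cases hs : pvSkip (String.ofList buf) = true <;>
        simp [hs, pvCM_append, pvCM_text]
    · rw [List.foldl_nil]
      have hfin : sepBFinish name (out, buf, true)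
          = out ++ [pvEntryMotion (PySem.Str.replace (String.ofList buf) name "")] := by
        simp [sepBFinish]
      rw [hfin, pvCM_append, pvCM_motion_cons, pvCM_nil]
      rfl
  | cons c t ih =>
    intro out buf m
    rw [List.foldl_cons]
    by_cases h1 : m = false ∧ c = '['
    · obtain ⟨hm, hc⟩ := h1
      subst hm; subst hc
      have hstep : sepBStep name (out, buf, false) '[' =
          ((if pvSkip (String.ofList buf) then out else out ++ [pvEntryText (String.ofList buf)]), [], true) := by
        simp [sepBStep]
      rw [hstep, ih]
      have : pvCM (if pvSkip (String.ofList buf) = true then out else out ++ [pvEntryText (String.ofList buf)]) = pvCM out := by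
        by_cases hs : pvSkip (String.ofList buf) = true <;> simp [hs, pvCM_append, pvCM_text]
      rw [this]
      simp [pvG]
    · by_cases h2 : m = true ∧ c = ']'
      · obtain ⟨hm, hc⟩ := h2
        subst hm; subst hc
        have hstep : sepBStep name (out, buf, true) ']' =
            (out ++ [pvEntryMotion (PySem.Str.replace (String.ofList buf) name "")], [], false) := by
          simp [sepBStep]
        rw [hstep, ih, pvCM_append, pvCM_motion_cons, pvCM_nil]
        simp [pvG]
        omega
      · have hstep : sepBStep name (out, buf, m) c = (out, buf ++ [c], m) := by
          simp only [sepBStep]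
          rw [if_neg (by exact fun hh => h1 ⟨hh.1, hh.2⟩), if_neg (by exact fun hh => h2 ⟨hh.1, hh.2⟩)]
        rw [hstep, ih]
        cases m
        · have hc : c ≠ '[' := fun he => h1 ⟨rfl, he⟩
          simp [pvG, hc]
        · have hc : c ≠ ']' := fun he => h2 ⟨rfl, he⟩
          simp [pvG, hc]

-- A's motion count dominates pvG, strictly on a quirky input
theorem sep_count_main (charaSet : List (String × String)) (name : String)
    (hn : PySem.Dict.get? (PySem.Dict.mk charaSet) "name" = some name) :
    ∀ (fuel : Nat) (cs : List Char), cs.length < fuel → pvPreB cs = true →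
      pvG false cs ≤ pvCM (sepA charaSet fuel cs) ∧
        (pvQuirkB false cs = true → pvG false cs < pvCM (sepA charaSet fuel cs)) := by
  intro fuel
  induction fuel with
  | zero => intro cs h; exact absurd h (Nat.not_lt_zero _)
  | succ n ih =>
    intro cs hlen hp
    by_cases hb : '[' ∈ cs
    · rcases sep_decomp2 cs hb hp with ⟨before, mid, rest, he, hnb, hncb, hncm, hpr, hqe⟩ |
        ⟨before, rest, he, hnb, hncb, hbr, hpr, hqt⟩
      · -- first bracket is '[': one motion on both sides, recurse on rest
        have hcl : ']' ∈ cs := by rw [he]; simp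
        have hr : cs.idxOf ']' = before.length + 1 + mid.length := by
          have hcs : cs = (before ++ '[' :: mid) ++ ']' :: rest := by simp [he]
          rw [hcs, idxOf_first ']' (before ++ '[' :: mid) rest (by
            intro hmem
            rcases (List.mem_append.mp hmem) with h' | h'
            · exact hncb h'
            · rcases List.mem_cons.mp h' with h'' | h''
              · exact absurd h'' (by decide)
              · exact hncm h'')]
          simp; omega
        have hta : cs.drop (before.length + 1 + mid.length + 1) = rest := by
          have hcs : cs = (before ++ '[' :: mid ++ [']']) ++ rest := by simp [he]
          rw [hcs]; exact List.drop_left' (by simp; omega)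
        have hrest : rest.length < n := by
          have : cs.length = before.length + 1 + (mid.length + 1 + rest.length) := by
            rw [he]; simp; omega
          omega
        have hA : pvCM (sepA charaSet (n + 1) cs) = pvCM (sepA charaSet n rest) + 1 := by
          rw [sepA, if_pos hb, if_pos hcl, hn]
          simp only [hr, hta]
          rw [pvCM_append, pvCM_iftext, pvCM_motion_cons]
          omega
        have hG : pvG false cs = pvG false rest + 1 := by
          rw [he, pvG_prefix_false before hnb]
          have h1 : pvG false ('[' :: (mid ++ ']' :: rest)) = pvG true (mid ++ ']' :: rest) := by
            simp [pvG]
          rw [h1, pvG_prefix_true mid hncm]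
          simp [pvG]
        obtain ⟨ihle, ihlt⟩ := ih rest hrest hpr
        constructor
        · omega
        · intro hq
          have := ihlt (by rw [← hqe]; exact hq)
          omega
      · -- first bracket is ']' with a '[' still following: A spends a motion, B does not
        have hcl : ']' ∈ cs := by rw [he]; simp
        have hr : cs.idxOf ']' = before.length := by
          rw [he]; exact idxOf_first ']' before rest hncb
        have hta : cs.drop (before.length + 1) = rest := by
          have hcs : cs = (before ++ [']']) ++ rest := by simp [he]
          rw [hcs]; exact List.drop_left' (by simp)
        have hrest : rest.length < n := by
          have : cs.length = before.length + 1 + rest.length := by rw [he]; simp; omega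
          omega
        have hA : pvCM (sepA charaSet (n + 1) cs) = pvCM (sepA charaSet n rest) + 1 := by
          rw [sepA, if_pos hb, if_pos hcl, hn]
          simp only [hr, hta]
          rw [pvCM_append, pvCM_iftext, pvCM_motion_cons]
          omega
        have hG : pvG false cs = pvG false rest := by
          rw [he, pvG_prefix_false before hnb]
          simp [pvG]
        obtain ⟨ihle, _⟩ := ih rest hrest hpr
        exact ⟨by omega, fun _ => by omega⟩
    · have hA : pvCM (sepA charaSet (n + 1) cs) = 0 := by
        rw [sepA, if_neg hb]
        by_cases hs : pvSkip (String.ofList cs) = true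
        · rw [if_pos hs]; rfl
        · rw [if_neg hs]; exact pvCM_text _
      have hq := pvQuirk_no_open cs hb
      exact ⟨by simp [hA, pvG_no_open cs hb], fun h => by rw [h] at hq; cases hq⟩

-- ===== VERDICT (by name: the statement is the Claim_ definition above) =====
theorem seperate_response_spec : Claim_unchanged_seperate_response := by
  intro response charaSet _dom pre hnd
  have hq : pvQuirkB false response.toList = false := by
    by_contra h
    exact hnd (by simpa [D_seperate_response] using Bool.of_not_eq_false h)
  unfold seperate_response seperate_response_alt
  by_cases hb : '[' ∈ response.toList
  · obtain ⟨v, hv⟩ := Option.isSome_iff_exists.mp (pre.2 hb)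
    rw [if_pos hb, hv]
    exact sep_main charaSet v hv _ response.toList (Nat.lt_succ_self _) pre.1 hq
  · rw [if_neg hb, sepA, if_neg hb, String.ofList_toList]

theorem seperate_response_changed : Claim_changed_seperate_response := by
  unfold Claim_changed_seperate_response; decide

theorem seperate_response_tight : Claim_exact_seperate_response := by
  intro response charaSet _dom pre hd heq
  have hb : '[' ∈ response.toList := pvQuirk_open response.toList false hd
  obtain ⟨v, hv⟩ := Option.isSome_iff_exists.mp (pre.2 hb)
  have hBc : pvCM (seperate_response_alt response charaSet) = pvG false response.toList := by
    unfold seperate_response_alt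
    rw [if_pos hb, hv, sepB_count]
    simp [pvCM_nil, pvCM]
  have hAc : pvG false response.toList < pvCM (seperate_response response charaSet) :=
    (sep_count_main charaSet v hv (response.toList.length + 1) response.toList
      (Nat.lt_succ_self _) pre.1).2 hd
  rw [heq, hBc] at hAc
  exact lt_irrefl _ hAc
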